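-- pv_equiv track=rewrite | github.com/hknUcak/covertovert_phase2 | code/MyCovertChannel.py | validate_chunk
-- ===== SOURCE A (Python) =====
-- def validate_chunk(chunk, validation_mode):
--     """Validate chunk based on selected mode"""
--     if validation_mode == 'xor':
--         xor_result = 0
--         for bit in chunk:
--             xor_result ^= int(bit)
--         return xor_result == 1
--     elif validation_mode == 'parity':
--         return sum(int(bit) for bit in chunk) % 2 == 1
--     elif validation_mode == 'pattern':
--         return not all(chunk[i] == chunk[i-1] for i in range(1, len(chunk)))
--     return True
-- ===== SOURCE B (Python) =====
-- def _xor_all(vals):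
--     """XOR of all values by divide and conquer."""
--     if not vals:
--         return 0
--     if len(vals) == 1:
--         return vals[0]
--     mid = len(vals) // 2
--     return _xor_all(vals[:mid]) ^ _xor_all(vals[mid:])
--
--
-- def validate_chunk(chunk, validation_mode):
--     """Validate chunk based on selected mode"""
--     if validation_mode in ('xor', 'parity'):
--         vals = [int(b) for b in chunk]
--         if validation_mode == 'parity':
--             vals = [v % 2 for v in vals]
--         return _xor_all(vals) == 1
--     if validation_mode == 'pattern':
--         return chunk != chunk[:1] * len(chunk)
--     return True
-- ===== Notes on version B (the rewrite author's own statement) =====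
-- stated objective: alternative
-- what changed: xor and parity are unified into one divide-and-conquer XOR combine over a pre-built int list (parity reduces each element mod 2 first, since XOR of bits is the sum's parity), replacing A's left-to-right accumulator loops; pattern mode compares the list against head-repeated-n-times (chunk[:1]*len(chunk)) instead of scanning adjacent index pairs.
import Mathlib
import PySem

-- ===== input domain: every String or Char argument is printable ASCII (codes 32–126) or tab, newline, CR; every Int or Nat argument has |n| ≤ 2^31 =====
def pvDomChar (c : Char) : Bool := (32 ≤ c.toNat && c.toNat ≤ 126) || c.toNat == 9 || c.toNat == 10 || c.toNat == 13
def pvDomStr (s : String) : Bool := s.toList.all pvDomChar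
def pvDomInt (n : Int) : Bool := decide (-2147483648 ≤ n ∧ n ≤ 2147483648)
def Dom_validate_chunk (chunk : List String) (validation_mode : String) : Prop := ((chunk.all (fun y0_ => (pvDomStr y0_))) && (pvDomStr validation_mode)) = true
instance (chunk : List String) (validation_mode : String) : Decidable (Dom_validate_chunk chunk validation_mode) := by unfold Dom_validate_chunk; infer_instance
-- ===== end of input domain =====

-- B: xor/parity share one divide-and-conquer XOR combine (parity first reduces each int mod 2); pattern compares the list against its head repeated len times.


-- ===== PORT A =====
-- int(bit) is ported as (PySem.Int.ofStr? bit).getD 0; Pre_ excludes the inputs where it is none (Python ValueError).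
def validate_chunk (chunk : List String) (validation_mode : String) : Bool :=
  if validation_mode == "xor" then
    (chunk.foldl (fun acc bit => PySem.Int.bxor acc ((PySem.Int.ofStr? bit).getD 0)) 0) == 1
  else if validation_mode == "parity" then
    PySem.Int.mod (chunk.foldl (fun s bit => s + (PySem.Int.ofStr? bit).getD 0) 0) 2 == 1
  else if validation_mode == "pattern" then
    !((PySem.List.pyRange 1 (chunk.length : Int) 1).all (fun i =>
        PySem.List.pyGet? chunk i == PySem.List.pyGet? chunk (i - 1)))
  else true

-- ===== PORT B =====
-- divide-and-conquer XOR of a list of ints (Source B's _xor_all; vals[:mid]/vals[mid:] are take/drop)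
def xorAll (vals : List Int) : Int :=
  match h : vals with
  | [] => 0
  | [v] => v
  | _ :: _ :: _ =>
    PySem.Int.bxor (xorAll (vals.take (vals.length / 2))) (xorAll (vals.drop (vals.length / 2)))
termination_by vals.length
decreasing_by
  · subst h; simp only [List.length_take]; simp only [List.length_cons]; omega
  · subst h; simp only [List.length_drop]; simp only [List.length_cons]; omega

-- 'chunk[:1] * len(chunk)' ported by hand as flatten (replicate len (take 1)); exact: Python list repetition is n-fold concatenation.
def validate_chunk_alt (chunk : List String) (validation_mode : String) : Bool :=
  if validation_mode == "xor" || validation_mode == "parity" then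
    let vals := chunk.map (fun b => (PySem.Int.ofStr? b).getD 0)
    let vals := if validation_mode == "parity" then vals.map (fun v => PySem.Int.mod v 2) else vals
    xorAll vals == 1
  else if validation_mode == "pattern" then
    chunk != (List.replicate chunk.length (chunk.take 1)).flatten
  else true

-- ===== PRECONDITION & SPEC =====
-- Pre_ excludes exactly the inputs where Python A raises ValueError: in 'xor'/'parity' mode every element must parse as int.
def Pre_validate_chunk (chunk : List String) (validation_mode : String) : Prop :=
  (validation_mode = "xor" ∨ validation_mode = "parity") →
    ∀ b ∈ chunk, (PySem.Int.ofStr? b).isSome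
instance (chunk : List String) (validation_mode : String) : Decidable (Pre_validate_chunk chunk validation_mode) := by unfold Pre_validate_chunk; infer_instance
def pvWitness_validate_chunk : List String × String := (["1", "0", "1"], "xor")

def Spec_validate_chunk (chunk : List String) (validation_mode : String) (out : Bool) : Prop := out = validate_chunk_alt chunk validation_mode
instance (chunk : List String) (validation_mode : String) (out : Bool) : Decidable (Spec_validate_chunk chunk validation_mode out) := by unfold Spec_validate_chunk; infer_instance

-- ===== CLAIM (what is proved, stated in full; the proofs are below) =====
def Claim_equal_validate_chunk : Prop := ∀ (chunk : List String) (validation_mode : String), Dom_validate_chunk chunk validation_mode → Pre_validate_chunk chunk validation_mode → Spec_validate_chunk chunk validation_mode (validate_chunk chunk validation_mode)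

-- ===== LEMMAS AND PROOFS =====

theorem bxor_negSucc_negSucc (m n : Nat) : PySem.Int.bxor (Int.negSucc m) (Int.negSucc n) = (↑(m ^^^ n) : Int) := by
  simp [PySem.Int.bxor, Int.negSucc_eq]
  ring_nf
  norm_num
  split_ifs <;> first | rfl | omega

theorem bxor_ofNat_negSucc (m n : Nat) : PySem.Int.bxor (↑m) (Int.negSucc n) = Int.negSucc (m ^^^ n) := by
  simp [PySem.Int.bxor, Int.negSucc_eq]
  ring_nf
  split_ifs <;> first | rfl | omega

theorem bxor_negSucc_ofNat (m n : Nat) : PySem.Int.bxor (Int.negSucc m) (↑n) = Int.negSucc (m ^^^ n) := by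
  simp [PySem.Int.bxor, Int.negSucc_eq]
  ring_nf
  split_ifs <;> first | rfl | omega

theorem bxor_assoc' (a b c : Int) : PySem.Int.bxor (PySem.Int.bxor a b) c = PySem.Int.bxor a (PySem.Int.bxor b c) := by
  rcases a with m | m <;> rcases b with n | n <;> rcases c with k | k <;>
    simp [bxor_negSucc_negSucc, bxor_ofNat_negSucc, bxor_negSucc_ofNat, Nat.xor_assoc]

theorem zero_bxor (a : Int) : PySem.Int.bxor 0 a = a := by
  rw [PySem.Int.bxor_comm, PySem.Int.bxor_zero]

theorem foldl_bxor_acc (l : List Int) (acc : Int) :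
    l.foldl PySem.Int.bxor acc = PySem.Int.bxor acc (l.foldl PySem.Int.bxor 0) := by
  induction l generalizing acc with
  | nil => simp
  | cons b t ih =>
    simp only [List.foldl_cons]
    rw [ih (PySem.Int.bxor acc b), ih (PySem.Int.bxor 0 b), zero_bxor, bxor_assoc']

-- divide-and-conquer XOR equals the left fold
theorem xorAll_eq (l : List Int) : xorAll l = l.foldl PySem.Int.bxor 0 := by
  fun_induction xorAll l with
  | case1 => rfl
  | case2 v => simp [zero_bxor]
  | case3 x y t ih1 ih2 =>
    rw [ih1, ih2]
    conv_rhs => rw [← List.take_append_drop ((x :: y :: t).length / 2) (x :: y :: t)]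
    rw [List.foldl_append, foldl_bxor_acc (List.drop ((x :: y :: t).length / 2) (x :: y :: t))
      (List.foldl PySem.Int.bxor 0 (List.take ((x :: y :: t).length / 2) (x :: y :: t)))]

-- XOR of {0,1}-values is the sum's parity
theorem foldl_bxor_bits (l : List Int) (acc : Int) (hl : ∀ v ∈ l, v = 0 ∨ v = 1)
    (ha : acc = 0 ∨ acc = 1) :
    l.foldl PySem.Int.bxor acc = (acc + l.sum) % 2 := by
  induction l generalizing acc with
  | nil => simp; omega
  | cons b t ih =>
    have hb := hl b (by simp)
    have hx : PySem.Int.bxor acc b = (acc + b) % 2 := by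
      rcases ha with rfl | rfl <;> rcases hb with rfl | rfl <;> decide
    rw [List.foldl_cons, ih (PySem.Int.bxor acc b) (fun v hv => hl v (List.mem_cons_of_mem _ hv))
      (by rcases ha with rfl | rfl <;> rcases hb with rfl | rfl <;> simp [hx]), hx, List.sum_cons]
    omega

theorem sum_map_mod_two (l : List Int) : (l.map (fun v => v % 2)).sum % 2 = l.sum % 2 := by
  induction l with
  | nil => rfl
  | cons b t ih => simp only [List.map_cons, List.sum_cons]; omega

-- pattern-mode helpers (all-adjacent-equal ⟺ the list is its head replicated)
def allEqB : List String → Bool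
  | [] => true
  | [_] => true
  | x :: y :: t => (y == x) && allEqB (y :: t)

theorem adj_aux (t : List String) (x : String) :
    (List.range t.length).all (fun k => (x :: t)[k+1]? == (x :: t)[k]?) = allEqB (x :: t) := by
  induction t generalizing x with
  | nil => simp [allEqB]
  | cons y t' ih =>
    simp only [List.length_cons, List.range_succ_eq_map, List.all_cons, List.all_map,
      Function.comp_def, List.getElem?_cons_succ, List.getElem?_cons_zero]
    rw [show ((List.range t'.length).all fun k => t'[k]? == (y :: t')[k]?) = allEqB (y :: t') from by
      rw [← ih y]; exact List.all_congr rfl (fun k => by simp)]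
    simp [allEqB]

theorem range_adj_eq_allEqB (l : List String) :
    ((List.range (l.length - 1)).all (fun k => l[k+1]? == l[k]?)) = allEqB l := by
  cases l with
  | nil => simp [allEqB]
  | cons x t => simpa using adj_aux t x

theorem allEqB_iff_replicate (x : String) (t : List String) :
    allEqB (x :: t) = true ↔ x :: t = List.replicate (t.length + 1) x := by
  induction t generalizing x with
  | nil => simp [allEqB]
  | cons y t' ih =>
    simp only [allEqB, Bool.and_eq_true, beq_iff_eq, ih]
    constructor
    · rintro ⟨rfl, h⟩
      simp [List.replicate_succ, h]
    · intro h
      have hx : x :: y :: t' = x :: List.replicate (t'.length + 1) x := by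
        simpa [List.replicate_succ] using h
      have h2 : y :: t' = List.replicate (t'.length + 1) x := by
        exact (List.cons_inj_right x).mp hx
      have hy : y = x := by
        have := congrArg (fun l => l.head?) h2
        simpa [List.replicate_succ] using this
      subst hy
      exact ⟨rfl, h2⟩

theorem flatten_replicate_single (n : Nat) (x : String) :
    (List.replicate n [x]).flatten = List.replicate n x := by
  induction n with
  | zero => rfl
  | succ m ih => simp [List.replicate_succ, ih]

theorem pattern_branch (l : List String) :
    (!((PySem.List.pyRange 1 (l.length : Int) 1).all (fun i =>
        PySem.List.pyGet? l i == PySem.List.pyGet? l (i - 1))))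
      = (l != (List.replicate l.length (l.take 1)).flatten) := by
  have hR : PySem.List.pyRange 1 (l.length : Int) 1
      = (List.range (l.length - 1)).map (fun k : Nat => 1 + (k : Int)) := by
    have ht : ((l.length : Int) - 1).toNat = l.length - 1 := by omega
    rw [PySem.List.pyRange_one, ht]
  rw [hR, List.all_map]
  have hall : ((List.range (l.length - 1)).all
      ((fun i => PySem.List.pyGet? l i == PySem.List.pyGet? l (i - 1)) ∘ (fun k : Nat => 1 + (k : Int))))
      = ((List.range (l.length - 1)).all (fun k => l[k+1]? == l[k]?)) := by
    refine List.all_congr rfl (fun k => ?_)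
    simp only [Function.comp_def]
    have h2 : (1 + (k:Int)) - 1 = ((k : Nat) : Int) := by omega
    have h1 : (1 + (k:Int)) = ((k+1 : Nat) : Int) := by omega
    rw [h2, h1, PySem.List.pyGet?_natCast, PySem.List.pyGet?_natCast]
  rw [hall, range_adj_eq_allEqB]
  cases l with
  | nil => decide
  | cons x t =>
    simp only [List.take_succ_cons, List.take_zero, List.length_cons,
      flatten_replicate_single]
    cases hA : allEqB (x :: t) with
    | true =>
      have he := (allEqB_iff_replicate x t).mp hA
      simp [← he]
    | false =>
      have hne : x :: t ≠ List.replicate (t.length + 1) x := by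
        intro h
        rw [(allEqB_iff_replicate x t).mpr h] at hA
        exact Bool.noConfusion hA
      simp [bne_iff_ne, hne]

-- ===== VERDICT (by name: the statement is the Claim_ definition above) =====
theorem validate_chunk_spec : Claim_equal_validate_chunk := by
  intro chunk validation_mode _ _
  unfold Spec_validate_chunk validate_chunk validate_chunk_alt
  by_cases hx : validation_mode = "xor"
  · subst hx
    rw [if_pos (by decide), if_pos (by decide)]
    simp only [String.reduceBEq]
    rw [if_neg Bool.false_ne_true, xorAll_eq, List.foldl_map]
  · by_cases hp : validation_mode = "parity"
    · subst hp
      rw [if_neg (by decide), if_pos (by decide), if_pos (by decide)]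
      simp only [String.reduceBEq]
      rw [if_pos trivial, xorAll_eq]
      set vals := chunk.map (fun b => (PySem.Int.ofStr? b).getD 0) with hv
      have hbits : ∀ v ∈ vals.map (fun v => PySem.Int.mod v 2), v = 0 ∨ v = 1 := by
        intro v hv'
        rcases List.mem_map.mp hv' with ⟨w, _, rfl⟩
        rw [PySem.Int.mod_eq_emod_of_pos (by norm_num)]
        omega
      rw [foldl_bxor_bits _ 0 hbits (Or.inl rfl)]
      have hm : ∀ v : Int, PySem.Int.mod v 2 = v % 2 := fun v =>
        PySem.Int.mod_eq_emod_of_pos (by norm_num)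
      have hmap : vals.map (fun v => PySem.Int.mod v 2) = vals.map (fun v => v % 2) :=
        List.map_congr_left (fun v _ => hm v)
      have hsum : chunk.foldl (fun s bit => s + (PySem.Int.ofStr? bit).getD 0) 0 = vals.sum := by
        rw [List.sum_eq_foldl, List.foldl_map]
      rw [hmap, hsum, hm, Bool.eq_iff_iff]
      simp only [beq_iff_eq]
      have := sum_map_mod_two vals
      omega
    · by_cases hq : validation_mode = "pattern"
      · subst hq
        rw [if_neg (by decide), if_neg (by decide), if_pos (by decide), if_neg (by decide),
          if_pos (by decide)]
        exact pattern_branch chunk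
      · have bx : (validation_mode == "xor") ≠ true := by simp [hx]
        have bp : (validation_mode == "parity") ≠ true := by simp [hp]
        have bq : (validation_mode == "pattern") ≠ true := by simp [hq]
        rw [if_neg bx, if_neg bp, if_neg bq,
          if_neg (by simp [hx, hp]), if_neg bq]
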